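-- pv_equiv track=rewrite | github.com/pypi-data/pypi-mirror-80 | packages/rattail-fabric2/rattail-fabric2-0.2.4.tar.gz/rattail-fabric2-0.2.4/rattail_fabric2/util.py | _escape_for_regex
-- ===== SOURCE A (Python) =====
-- def _escape_for_regex(text):
--     """
--     NOTE: This was copied from the upstream ``fabric.contrib.files`` (v1) module.
--
--     Escape ``text`` to allow literal matching using egrep
--     """
--     re_specials = '\\^$|(){}[]*+?.'
--     sh_specials = '\\$`"'
--     re_chars = []
--     sh_chars = []
--
--     for c in text:
--         if c in re_specials:
--             re_chars.append('\\')
--         re_chars.append(c)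
--
--     for c in re_chars:
--         if c in sh_specials:
--             sh_chars.append('\\')
--         sh_chars.append(c)
--
--     return ''.join(sh_chars)
-- ===== SOURCE B (Python) =====
-- def _escape_for_regex(text):
--     """Single pass over ``text`` using a translation table built once from the
--     two special-character spec strings (regex specials and shell specials)."""
--     re_specials = '\\^$|(){}[]*+?.'
--     sh_specials = '\\$`"'
--     table = {}
--     for c in re_specials:
--         # the backslash inserted by regex-escaping is itself shell-escaped,
--         # and the char itself gains one more backslash if it is a shell special
--         table[c] = '\\\\' + ('\\' if c in sh_specials else '') + c
--     for c in sh_specials: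
--         if c not in re_specials:
--             table[c] = '\\' + c
--     return ''.join(table.get(c, c) for c in text)
-- ===== Notes on version B (the rewrite author's own statement) =====
-- stated objective: simpler
-- what changed: Replaced A's two sequential escaping passes (regex-escape into one intermediate list, then shell-escape that list) by a single pass over the text using a per-character translation table built once from the two special-character spec strings.
import Mathlib
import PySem

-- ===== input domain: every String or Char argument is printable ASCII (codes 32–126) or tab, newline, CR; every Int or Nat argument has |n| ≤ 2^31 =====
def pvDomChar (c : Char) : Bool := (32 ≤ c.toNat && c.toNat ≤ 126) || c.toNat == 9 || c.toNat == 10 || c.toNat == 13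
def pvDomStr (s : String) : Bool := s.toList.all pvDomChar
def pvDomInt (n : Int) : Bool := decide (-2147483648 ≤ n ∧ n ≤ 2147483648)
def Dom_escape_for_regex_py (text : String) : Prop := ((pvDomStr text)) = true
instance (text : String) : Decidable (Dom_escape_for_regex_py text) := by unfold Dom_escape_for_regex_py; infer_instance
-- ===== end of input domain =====

-- B replaces A's two sequential escaping passes by a single pass over the text with a
-- translation table built once from the two special-character spec strings (objective: simpler).


-- ===== PORT A =====
-- 'c in <constant string>' for the single char c is character membership; ported as list membership (exact).
def escape_for_regex_py (text : String) : String :=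
  let re_specials : List Char := "\\^$|(){}[]*+?.".toList
  let sh_specials : List Char := "\\$`\"".toList
  let re_chars : List Char := text.toList.foldl
    (fun acc c => (if re_specials.contains c then acc ++ ['\\'] else acc) ++ [c]) []
  let sh_chars : List Char := re_chars.foldl
    (fun acc c => (if sh_specials.contains c then acc ++ ['\\'] else acc) ++ [c]) []
  PySem.Str.join "" (sh_chars.map (fun c => String.ofList [c]))

-- ===== PORT B =====
-- the translation table Source B builds once from the two spec strings
def pvTable : PySem.Dict Char String :=
  let re_specials : List Char := "\\^$|(){}[]*+?.".toList
  let sh_specials : List Char := "\\$`\"".toList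
  let t1 : PySem.Dict Char String := re_specials.foldl
    (fun t c => t.insert c (String.ofList ('\\' :: '\\' ::
      ((if sh_specials.contains c then ['\\'] else []) ++ [c])))) ⟨[]⟩
  sh_specials.foldl
    (fun t c => if re_specials.contains c then t else t.insert c (String.ofList ['\\', c])) t1

def escape_for_regex_py_alt (text : String) : String :=
  PySem.Str.join "" (text.toList.map (fun c => pvTable.getD c (String.ofList [c])))

-- ===== PRECONDITION & SPEC =====
def Spec_escape_for_regex_py (text : String) (out : String) : Prop := out = escape_for_regex_py_alt text
instance (text : String) (out : String) : Decidable (Spec_escape_for_regex_py text out) := by unfold Spec_escape_for_regex_py; infer_instance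

-- ===== CLAIM (what is proved, stated in full; the proofs are below) =====
def Claim_equal_escape_for_regex_py : Prop := ∀ (text : String), Dom_escape_for_regex_py text → Spec_escape_for_regex_py text (escape_for_regex_py text)

-- ===== LEMMAS AND PROOFS =====

-- per-character expansion of A's two passes
def pvEscA (c : Char) : List Char :=
  ((if ("\\^$|(){}[]*+?.".toList).contains c then ['\\', c] else [c]).flatMap
    (fun d => if ("\\$`\"".toList).contains d then ['\\', d] else [d]))

-- A's escaping loop as a flatMap
theorem pv_foldl_esc (p : Char → Bool) (l : List Char) : ∀ (acc : List Char),
    l.foldl (fun acc c => (if p c then acc ++ ['\\'] else acc) ++ [c]) acc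
      = acc ++ l.flatMap (fun c => if p c then ['\\', c] else [c]) := by
  induction l with
  | nil => simp
  | cons c cs ih =>
      intro acc
      simp only [List.foldl_cons, List.flatMap_cons, ih]
      by_cases h : p c <;> simp [h]

theorem pv_flatten_intersperse_nil (l : List (List Char)) :
    (l.intersperse []).flatten = l.flatten := by
  induction l with
  | nil => rfl
  | cons a t ih => cases t <;> simp_all [List.intersperse]

theorem pv_join_toList (parts : List String) :
    (PySem.Str.join "" parts).toList = (parts.map String.toList).flatten := by
  simp [PySem.Str.join, PySem.Chars.join, List.intercalate, pv_flatten_intersperse_nil]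

-- B's table lookup agrees character-wise with A's two-pass expansion
theorem pv_perchar (c : Char) :
    (pvTable.getD c (String.ofList [c])).toList = pvEscA c := by
  by_cases h : c ∈ ['\\', '^', '$', '|', '(', ')', '{', '}', '[', ']', '*', '+', '?', '.', '`', '"']
  · fin_cases h <;> rfl
  · simp only [List.mem_cons, not_or] at h
    obtain ⟨h1, h2, h3, h4, h5, h6, h7, h8, h9, h10, h11, h12, h13, h14, h15, h16, -⟩ := h
    simp [pvTable, pvEscA, PySem.Dict.getD, PySem.Dict.get?, PySem.Dict.insert, PySem.Dict.contains,
      List.find?,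
      beq_eq_false_iff_ne.mpr (Ne.symm h1), beq_eq_false_iff_ne.mpr h1, beq_eq_false_iff_ne.mpr (Ne.symm h2), beq_eq_false_iff_ne.mpr h2, beq_eq_false_iff_ne.mpr (Ne.symm h3), beq_eq_false_iff_ne.mpr h3, beq_eq_false_iff_ne.mpr (Ne.symm h4), beq_eq_false_iff_ne.mpr h4, beq_eq_false_iff_ne.mpr (Ne.symm h5), beq_eq_false_iff_ne.mpr h5, beq_eq_false_iff_ne.mpr (Ne.symm h6), beq_eq_false_iff_ne.mpr h6, beq_eq_false_iff_ne.mpr (Ne.symm h7), beq_eq_false_iff_ne.mpr h7, beq_eq_false_iff_ne.mpr (Ne.symm h8), beq_eq_false_iff_ne.mpr h8, beq_eq_false_iff_ne.mpr (Ne.symm h9), beq_eq_false_iff_ne.mpr h9, beq_eq_false_iff_ne.mpr (Ne.symm h10), beq_eq_false_iff_ne.mpr h10, beq_eq_false_iff_ne.mpr (Ne.symm h11), beq_eq_false_iff_ne.mpr h11, beq_eq_false_iff_ne.mpr (Ne.symm h12), beq_eq_false_iff_ne.mpr h12, beq_eq_false_iff_ne.mpr (Ne.symm h13), beq_eq_false_iff_ne.mpr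 h13, beq_eq_false_iff_ne.mpr (Ne.symm h14), beq_eq_false_iff_ne.mpr h14, beq_eq_false_iff_ne.mpr (Ne.symm h15), beq_eq_false_iff_ne.mpr h15, beq_eq_false_iff_ne.mpr (Ne.symm h16), beq_eq_false_iff_ne.mpr h16, h1, h2, h3, h4, h5, h6, h7, h8, h9, h10, h11, h12, h13, h14, h15, h16]

theorem pv_flatten_singletons (l : List Char) : (l.map (fun c => [c])).flatten = l := by
  induction l with
  | nil => rfl
  | cons a t ih => simp [ih]

-- ===== VERDICT (by name: the statement is the Claim_ definition above) =====
theorem escape_for_regex_py_spec : Claim_equal_escape_for_regex_py := by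
  intro text _
  show escape_for_regex_py text = escape_for_regex_py_alt text
  unfold escape_for_regex_py escape_for_regex_py_alt
  apply String.toList_inj.mp
  rw [pv_join_toList, pv_join_toList, pv_foldl_esc, pv_foldl_esc]
  simp only [List.nil_append, List.flatMap_assoc, List.map_map]
  rw [show (String.toList ∘ fun c => pvTable.getD c (String.ofList [c])) = pvEscA from
    funext fun c => pv_perchar c]
  rw [show (String.toList ∘ fun c : Char => String.ofList [c]) = (fun c : Char => [c]) from
    funext fun c => String.toList_ofList]
  rw [pv_flatten_singletons, List.flatten_eq_flatMap, List.flatMap_id, ← List.flatMap_def]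
  rfl
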